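-- pv_equiv track=rewrite | github.com/MartinLBarranco/Arithmos | numeros/permutacion.py | esprodCiclos
-- ===== SOURCE A (Python) =====
-- def esprodCiclos(listalista, n):
--   # Comprobamos que la suma de las longitudes son menores que n y que las longitudes de cada uno son mayores que 2
--   if not all(isinstance(elem, list) for elem in listalista) or not sum([len(elem) for elem in listalista]) <= n or not all(len(elem) >= 2 for elem in listalista):
--     return False
--   # Comprobamos que cada numero solo aparece 0 o 1 vez
--   union_listas = []
--   for elem in listalista:
--     union_listas = union_listas + elem
--   for i in range(1,n+1):
--     if union_listas.count(i) > 1: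
--       return False
--   # Comprobamos que todos los elementos estan entre 1 y n
--   if not all(i in range(1,n+1) for i in union_listas):
--     return False
--   # Comprobamos que son disjuntos dos a dos
--   conjuntos = [set(elem) for elem in listalista]
--   for i in range(len(conjuntos)):
--     for j in range(i+1, len(conjuntos)):
--       if set() != conjuntos[i].intersection(conjuntos[j]):
--         return False
--   return True
-- ===== SOURCE B (Python) =====
-- def esprodCiclos(listalista, n):
--     # One pass with a set: range/duplicate checks in a single traversal,
--     # no pairwise-intersection loop (a duplicate across cycles is just a duplicate).
--     seen = set()
--     total = 0
--     for cyc in listalista: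
--         if len(cyc) < 2:
--             return False
--         total += len(cyc)
--         for x in cyc:
--             if not (1 <= x <= n) or x in seen:
--                 return False
--             seen.add(x)
--     return total <= n
-- ===== Notes on version B (the rewrite author's own statement) =====
-- stated objective: alternative
-- what changed: Replaces the list concatenation, the per-value .count scan over range(1,n+1) and the pairwise set-intersection loops with a single pass over the cycles that maintains one 'seen' set and a running length total.
import Mathlib
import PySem

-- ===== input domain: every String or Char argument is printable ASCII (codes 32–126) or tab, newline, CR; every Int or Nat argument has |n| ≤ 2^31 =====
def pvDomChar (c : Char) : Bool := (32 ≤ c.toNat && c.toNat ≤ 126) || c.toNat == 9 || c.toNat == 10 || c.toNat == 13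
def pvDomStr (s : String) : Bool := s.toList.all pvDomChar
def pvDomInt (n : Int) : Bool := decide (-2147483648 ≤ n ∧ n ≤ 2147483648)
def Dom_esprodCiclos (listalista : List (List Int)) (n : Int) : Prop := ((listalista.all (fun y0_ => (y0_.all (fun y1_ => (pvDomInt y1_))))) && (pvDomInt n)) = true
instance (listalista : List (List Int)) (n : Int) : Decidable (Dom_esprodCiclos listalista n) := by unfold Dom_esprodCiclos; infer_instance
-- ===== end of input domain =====

-- B replaces A's concatenation + per-value count loop + pairwise set-intersection loops
-- by a single pass over the cycles maintaining one `seen` set (objective: alternative).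



-- ===== PORT A =====
-- Literal transliteration of A.  'isinstance(elem, list)' is always true under the type
-- convention; 'i in range(1,n+1)' is membership in PySem.List.pyRange 1 (n+1) 1;
-- 'conjuntos[i]' / 'conjuntos[j]' indices come from range(len(conjuntos)) so are always in
-- range — ported with pyGetD (default []), exact on in-range indices.
def esprodCiclos (listalista : List (List Int)) (n : Int) : Bool :=
  if ¬ (listalista.all (fun _ => true)) ∨
     ¬ ((listalista.map (fun elem => (elem.length : Int))).sum ≤ n) ∨
     ¬ (listalista.all (fun elem => 2 ≤ elem.length)) then false
  else
    let union_listas := listalista.foldl (fun acc elem => acc ++ elem) ([] : List Int)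
    if (PySem.List.pyRange 1 (n+1) 1).any (fun i => 1 < PySem.List.count union_listas i) then false
    else if ¬ (union_listas.all (fun i => decide (i ∈ PySem.List.pyRange 1 (n+1) 1))) then false
    else
      let conjuntos := listalista.map (fun elem => PySem.Set.ofList elem)
      if (PySem.List.pyRange 0 (conjuntos.length : Int) 1).any (fun i =>
           (PySem.List.pyRange (i+1) (conjuntos.length : Int) 1).any (fun j =>
             ¬ (PySem.Set.inter (PySem.List.pyGetD conjuntos i [])
                                (PySem.List.pyGetD conjuntos j []) = [])))
      then false
      else true


-- ===== PORT B =====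
-- inner loop of B: walk one cycle, checking 1 ≤ x ≤ n and freshness, adding x to `seen`
def epcAltInner (n : Int) (seen : PySem.Set Int) : List Int → Option (PySem.Set Int)
  | [] => some seen
  | x :: xs =>
    if ¬ (1 ≤ x ∧ x ≤ n) ∨ PySem.Set.contains seen x then none
    else epcAltInner n (PySem.Set.add seen x) xs


-- outer loop of B: walk the cycles keeping `seen` and the running total of lengths
def epcAltOuter (n : Int) (seen : PySem.Set Int) (total : Int) : List (List Int) → Bool
  | [] => total ≤ n
  | cyc :: rest =>
    if cyc.length < 2 then false
    else match epcAltInner n seen cyc with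
      | none => false
      | some seen' => epcAltOuter n seen' (total + cyc.length) rest


def esprodCiclos_alt (listalista : List (List Int)) (n : Int) : Bool :=
  epcAltOuter n PySem.Set.empty 0 listalista

-- ===== PRECONDITION & SPEC =====
def Spec_esprodCiclos (listalista : List (List Int)) (n : Int) (out : Bool) : Prop := out = esprodCiclos_alt listalista n
instance (listalista : List (List Int)) (n : Int) (out : Bool) : Decidable (Spec_esprodCiclos listalista n out) := by unfold Spec_esprodCiclos; infer_instance

-- ===== CLAIM (what is proved, stated in full; the proofs are below) =====
def Claim_equal_esprodCiclos : Prop := ∀ (listalista : List (List Int)) (n : Int), Dom_esprodCiclos listalista n → Spec_esprodCiclos listalista n (esprodCiclos listalista n)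

-- ===== LEMMAS AND PROOFS =====

-- the characterisation both programs decide: lengths sum to at most n, every cycle has at
-- least two elements, every value lies in 1..n, and no value occurs twice
def epcGood (L : List (List Int)) (n : Int) : Prop :=
  (L.map (fun elem => (elem.length : Int))).sum ≤ n ∧
  (∀ c ∈ L, 2 ≤ c.length) ∧
  (∀ x ∈ L.flatten, 1 ≤ x ∧ x ≤ n) ∧
  L.flatten.Nodup

lemma epcA_iff (L : List (List Int)) (n : Int) : esprodCiclos L n = true ↔ epcGood L n := by
  unfold esprodCiclos epcGood
  dsimp only
  split_ifs with h1 h2 h3 h4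
  -- branch: first guard fired
  · simp only [false_iff]
    simp only [List.all_eq_true, decide_eq_true_eq] at h1
    rintro ⟨hsum, hlen, -, -⟩
    rcases h1 with h | h | h
    · exact h (fun _ _ => trivial)
    · exact h hsum
    · exact h (fun c hc => hlen c hc)
  -- branch: duplicate-count loop fired
  · simp only [false_iff]
    simp only [List.any_eq_true, decide_eq_true_eq, PySem.List.count_eq,
      PySem.List.foldl_append_eq_flatten, List.nil_append] at h2
    rintro ⟨-, -, -, hnd⟩
    obtain ⟨i, -, hcnt⟩ := h2
    have := List.nodup_iff_count_le_one.mp hnd i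
    omega
  -- branch: range check passed (h3), pairwise-intersection loop fired (h4)
  · simp only [false_iff]
    simp only [List.any_eq_true, decide_eq_true_eq, PySem.List.mem_pyRange_one,
      List.length_map] at h4
    rintro ⟨-, -, -, hnd⟩
    obtain ⟨i, hi, j, hj, hne⟩ := h4
    have hi0 : 0 ≤ i := hi.1
    have hj0 : 0 ≤ j := by omega
    have hjlt : j.toNat < L.length := by omega
    have hilt : i.toNat < L.length := by omega
    have hij : i.toNat < j.toNat := by omega
    have hib : i < ((L.map (fun e => PySem.Set.ofList e)).length : Int) := by
      rw [List.length_map]; omega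
    have hjb : j < ((L.map (fun e => PySem.Set.ofList e)).length : Int) := by
      rw [List.length_map]; omega
    rw [PySem.List.pyGetD_eq_getElem _ _ hi0 hib,
        PySem.List.pyGetD_eq_getElem _ _ hj0 hjb] at hne
    have hsh : ∃ x, x ∈ (L.map (fun e => PySem.Set.ofList e))[i.toNat] ∧
                x ∈ (L.map (fun e => PySem.Set.ofList e))[j.toNat] := by
      by_contra hno
      push Not at hno
      apply hne
      unfold PySem.Set.inter
      rw [List.filter_eq_nil_iff]
      intro a ha hc
      exact hno a ha ((PySem.Set.contains_iff _ _).mp hc)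
    obtain ⟨x, hxi, hxj⟩ := hsh
    simp only [List.getElem_map, PySem.Set.mem_ofList] at hxi hxj
    have hpw := (List.nodup_flatten.mp hnd).2
    rw [List.pairwise_iff_getElem] at hpw
    exact hpw i.toNat j.toNat hilt hjlt hij hxi hxj
  -- branch: every guard passed
  · simp only [true_iff]
    simp only [List.all_eq_true, decide_eq_true_eq] at h1
    simp only [List.any_eq_true, decide_eq_true_eq, PySem.List.count_eq,
      PySem.List.mem_pyRange_one, PySem.List.foldl_append_eq_flatten, List.nil_append,
      List.all_eq_true, not_exists, not_and, not_lt] at h2 h3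
    push Not at h1
    refine ⟨h1.2.1, fun c hc => h1.2.2 c hc, ?_, ?_⟩
    · intro x hx
      obtain ⟨hl, hr⟩ := h3 x hx
      exact ⟨hl, by omega⟩
    · rw [List.nodup_iff_count_le_one]
      intro a
      by_cases ha : a ∈ L.flatten
      · have h2' := h2 a ⟨(h3 a ha).1, (h3 a ha).2⟩
        omega
      · simp [List.count_eq_zero.mpr ha]
  -- branch: range check failed
  · simp only [false_iff]
    simp only [List.all_eq_true, decide_eq_true_eq, PySem.List.mem_pyRange_one,
      PySem.List.foldl_append_eq_flatten, List.nil_append] at h3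
    rintro ⟨-, -, hr, -⟩
    apply h3
    intro i hi
    obtain ⟨hl, hr'⟩ := hr i hi
    exact ⟨hl, by omega⟩

lemma epcInner_some_iff (n : Int) (c : List Int) : ∀ (seen : PySem.Set Int),
    (epcAltInner n seen c).isSome ↔
      (∀ x ∈ c, 1 ≤ x ∧ x ≤ n) ∧ c.Nodup ∧ ∀ x ∈ c, x ∉ seen := by
  induction c with
  | nil => simp [epcAltInner]
  | cons x xs ih =>
    intro seen
    simp only [epcAltInner]
    split_ifs with h
    · simp only [Option.isSome_none, Bool.false_eq_true, false_iff]
      intro ⟨hr, _, hs⟩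
      rcases h with h | h
      · exact h (hr x (by simp))
      · exact hs x (by simp) ((PySem.Set.contains_iff _ _).mp h)
    · push Not at h
      rw [ih]
      simp only [List.mem_cons, List.nodup_cons]
      constructor
      · rintro ⟨hr, hnd, hs⟩
        refine ⟨?_, ⟨?_, hnd⟩, ?_⟩
        · rintro y (rfl | hy); · exact h.1
          · exact hr y hy
        · intro hx
          have := hs x hx
          rw [PySem.Set.mem_add] at this
          exact this (Or.inr rfl)
        · rintro y (rfl | hy) hmem
          · exact h.2 ((PySem.Set.contains_iff _ _).mpr hmem)
          · exact hs y hy (by simp [PySem.Set.mem_add, hmem])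
      · rintro ⟨hr, ⟨hx, hnd⟩, hs⟩
        refine ⟨fun y hy => hr y (Or.inr hy), hnd, fun y hy hmem => ?_⟩
        rw [PySem.Set.mem_add] at hmem
        rcases hmem with hmem | rfl
        · exact hs y (Or.inr hy) hmem
        · exact hx hy

lemma epcInner_mem (n : Int) (c : List Int) : ∀ (seen s : PySem.Set Int),
    epcAltInner n seen c = some s → ∀ y, y ∈ s ↔ y ∈ seen ∨ y ∈ c := by
  induction c with
  | nil => intro seen s h y; simp [epcAltInner] at h; simp [← h]
  | cons x xs ih =>
    intro seen s h y
    simp only [epcAltInner] at h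
    split_ifs at h
    rw [ih _ _ h y, PySem.Set.mem_add]
    simp only [List.mem_cons]
    tauto

lemma epcOuter_iff (n : Int) (cs : List (List Int)) : ∀ (seen : PySem.Set Int) (total : Int),
    epcAltOuter n seen total cs = true ↔
      (total + (cs.map (fun elem => (elem.length : Int))).sum ≤ n ∧
       (∀ c ∈ cs, 2 ≤ c.length) ∧
       (∀ x ∈ cs.flatten, 1 ≤ x ∧ x ≤ n) ∧
       cs.flatten.Nodup ∧
       ∀ x ∈ cs.flatten, x ∉ seen) := by
  induction cs with
  | nil => intro seen total; simp [epcAltOuter]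
  | cons cyc rest ih =>
    intro seen total
    simp only [epcAltOuter]
    split_ifs with hlen
    · simp only [false_iff]
      rintro ⟨_, h2, _⟩
      exact absurd (h2 cyc (by simp)) (by omega)
    · rcases hinner : epcAltInner n seen cyc with _ | seen'
      · simp only [Bool.false_eq_true, false_iff]
        rintro ⟨_, _, hr, hnd, hs⟩
        have : (epcAltInner n seen cyc).isSome := by
          rw [epcInner_some_iff]
          refine ⟨fun x hx => hr x (by simp [hx]), ?_, fun x hx => hs x (by simp [hx])⟩
          have := (List.nodup_flatten.mp hnd).1
          exact this cyc (by simp)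
        rw [hinner] at this; simp at this
      · rw [ih]
        have hmem := epcInner_mem n cyc seen seen' hinner
        have hsome : (epcAltInner n seen cyc).isSome := by rw [hinner]; simp
        rw [epcInner_some_iff] at hsome
        obtain ⟨hrc, hndc, hsc⟩ := hsome
        simp only [List.flatten_cons, List.map_cons, List.sum_cons, List.mem_cons,
          List.mem_append, List.nodup_append]
        constructor
        · rintro ⟨h1, h2, h3, h4, h5⟩
          refine ⟨by omega, ?_, ?_, ⟨hndc, h4, ?_⟩, ?_⟩
          · rintro c (rfl | hc); · omega
            · exact h2 c hc
          · rintro x (hx | hx); · exact hrc x hx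
            · exact h3 x hx
          · intro x hx y hy
            have h6 := h5 y hy
            rw [hmem] at h6
            intro heq; exact h6 (Or.inr (heq ▸ hx))
          · rintro x (hx | hx) hxs
            · exact hsc x hx hxs
            · have h6 := h5 x hx
              rw [hmem] at h6
              exact h6 (Or.inl hxs)
        · rintro ⟨h1, h2, h3, ⟨hnc, h4, hdisj⟩, h5⟩
          refine ⟨by omega, fun c hc => h2 c (Or.inr hc), fun x hx => h3 x (Or.inr hx), h4, ?_⟩
          intro x hx
          rw [hmem]
          rintro (hxs | hxc)
          · exact h5 x (Or.inr hx) hxs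
          · exact hdisj x hxc x hx rfl

lemma epcB_iff (L : List (List Int)) (n : Int) : esprodCiclos_alt L n = true ↔ epcGood L n := by
  unfold esprodCiclos_alt epcGood
  rw [epcOuter_iff]
  simp [PySem.Set.empty]

-- ===== VERDICT (by name: the statement is the Claim_ definition above) =====
theorem esprodCiclos_spec : Claim_equal_esprodCiclos := by
  intro L n _
  unfold Spec_esprodCiclos
  rw [Bool.eq_iff_iff, epcA_iff, epcB_iff]
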